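-- pv_equiv track=rewrite | github.com/suoto/dvb_fpga_debug | dvb/common.py | tabulate
-- ===== SOURCE A (Python) =====
-- def tabulate(table):
--     widths = {}
--     for line in table:
--         for i, row in enumerate(line):
--             widths[i] = max(widths.get(i, 0), len(str(row)))
--
--     result = []
--     for line in table:
--         current_line = []
--         for i, row in enumerate(line):
--             current_line.append(str(row).ljust(widths[i]))
--         result.append(current_line)
--
--     return result
-- ===== SOURCE B (Python) =====
-- def tabulate(table):
--     # column-major: walk the table column by column, appending each padded
--     # column's cells onto growing output rows; no width table is ever stored
--     rows = [[str(c) for c in line] for line in table]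
--     out = [[] for _ in rows]
--     j = 0
--     while True:
--         col = [r[j] for r in rows if len(r) > j]
--         if not col:
--             break
--         w = max(len(c) for c in col)
--         for r, o in zip(rows, out):
--             if len(r) > j:
--                 o.append(r[j].ljust(w))
--         j += 1
--     return out
-- ===== Notes on version B (the rewrite author's own statement) =====
-- stated objective: alternative
-- what changed: B formats the table column-major: it walks column index j outward, takes the j-th cell of every row that has one, pads that whole column to its max length and appends it onto growing output rows, so no width dict/table is ever materialised and no second row-major formatting pass exists.
import Mathlib
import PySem

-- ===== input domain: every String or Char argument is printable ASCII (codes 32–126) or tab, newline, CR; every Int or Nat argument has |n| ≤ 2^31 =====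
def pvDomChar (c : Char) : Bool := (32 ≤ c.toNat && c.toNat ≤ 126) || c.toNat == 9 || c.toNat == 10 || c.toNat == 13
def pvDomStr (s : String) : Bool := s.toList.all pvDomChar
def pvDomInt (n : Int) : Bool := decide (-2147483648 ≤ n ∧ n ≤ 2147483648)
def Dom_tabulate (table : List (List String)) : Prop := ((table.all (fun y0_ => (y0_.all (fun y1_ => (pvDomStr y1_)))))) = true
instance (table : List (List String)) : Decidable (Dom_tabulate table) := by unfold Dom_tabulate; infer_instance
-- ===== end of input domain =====

-- B (alternative, same cost): formats the table column-major — it walks column index j outward, pads the whole j-th column to its max length and appends it onto growing output rows — instead of A's width dict plus second row-major pass.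


-- ===== PORT A =====
-- str.ljust: pad with spaces on the right to width w (no-op if already at least w long);
-- shared primitive of both Pythons, ported once by hand (exact: ASCII space padding)
def pyLjust (s : String) (w : Nat) : String :=
  String.mk (s.toList ++ List.replicate (w - s.toList.length) ' ')

-- port of A: widths accumulated cell-by-cell in a dict keyed by the enumerate index;
-- widths[i] in the second pass always finds its key, so it is ported as getD _ 0
def tabulate (table : List (List String)) : List (List String) :=
  let widths : PySem.Dict Int Nat :=
    table.foldl
      (fun d line =>
        (PySem.List.enumerate line).foldl
          (fun d p => d.insert p.1 (max (d.getD p.1 0) p.2.toList.length)) d)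
      PySem.Dict.empty
  table.foldl
    (fun res line =>
      res ++ [(PySem.List.enumerate line).map (fun p => pyLjust p.2 (widths.getD p.1 0))])
    []

-- ===== PORT B =====
-- longest row length; used only as the termination measure of the while loop below
def maxLen (rows : List (List String)) : Nat :=
  rows.foldr (fun r m => max r.length m) 0

theorem length_le_maxLen (rows : List (List String)) (r : List String) (h : r ∈ rows) :
    r.length ≤ maxLen rows := by
  induction rows with
  | nil => cases h
  | cons a t ih =>
      rcases List.mem_cons.mp h with rfl | hm
      · simp only [maxLen, List.foldr_cons]; omega
      · have := ih hm; simp only [maxLen, List.foldr_cons] at *; omega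

-- the while loop of B: at column j, collect the j-th cell of every row that has
-- one; if the column is empty, stop; else pad the column to its max length and
-- append each padded cell to the matching output row ('o.append'), then j += 1.
-- Python's 'max(len(c) for c in col)' (col nonempty here) is PySem.List.max? id.
def colsLoop (rows : List (List String)) (out : List (List String)) (j : Nat) :
    List (List String) :=
  let col := (rows.filter (fun r => decide (j < r.length))).map (fun r => r.getD j "")
  if h : col = [] then out
  else
    let w := (PySem.List.max? (col.map (fun c => c.toList.length)) (fun y => y)).getD 0
    let out' := (rows.zip out).map
      (fun p => if j < p.1.length then p.2 ++ [pyLjust (p.1.getD j "") w] else p.2)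
    colsLoop rows out' (j + 1)
  termination_by maxLen rows - j
  decreasing_by
    rw [List.map_eq_nil_iff] at h
    obtain ⟨x, hx⟩ := List.exists_mem_of_ne_nil _ h
    have hlt : j < x.1.length := by simpa using (List.mem_filter.mp hx).2
    have := length_le_maxLen rows x.1 x.2
    omega

-- port of B: str(c) applied to every cell first, output rows start empty
def tabulate_alt (table : List (List String)) : List (List String) :=
  let rows := table.map (fun line => line.map (fun c => c))
  colsLoop rows (rows.map (fun _ => [])) 0

-- ===== PRECONDITION & SPEC =====
def Spec_tabulate (table : List (List String)) (out : List (List String)) : Prop := out = tabulate_alt table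
instance (table : List (List String)) (out : List (List String)) : Decidable (Spec_tabulate table out) := by unfold Spec_tabulate; infer_instance

-- ===== CLAIM (what is proved, stated in full; the proofs are below) =====
def Claim_equal_tabulate : Prop := ∀ (table : List (List String)), Dom_tabulate table → Spec_tabulate table (tabulate table)

-- ===== LEMMAS AND PROOFS =====

theorem lt_maxLen_of_filter_ne (rows : List (List String)) (j : Nat)
    (h : rows.filter (fun r => decide (j < r.length)) ≠ []) : j < maxLen rows := by
  induction rows with
  | nil => simp at h
  | cons r t ih =>
      by_cases hr : j < r.length
      · simp only [maxLen, List.foldr_cons]; omega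
      · rw [List.filter_cons_of_neg (by simpa using hr)] at h
        have := ih h
        simp only [maxLen, List.foldr_cons]
        simp only [maxLen] at this
        omega

-- width of column j of the table (0 for rows without a j-th cell)
def colW (rows : List (List String)) (j : Nat) : Nat :=
  rows.foldr (fun line m => max ((line.map (fun s => s.toList.length)).getD j 0) m) 0

-- canonical form both ports are reduced to
def canon (rows : List (List String)) : List (List String) :=
  rows.map (fun line => line.mapIdx (fun i c => pyLjust c (colW rows i)))

-- ---- A-side lemmas ----

-- max length contributed to key k by a line enumerated from s
def lineW : List String → Int → Int → Nat
  | [], _, _ => 0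
  | c :: l, s, k => if k = s then max c.toList.length (lineW l (s+1) k) else lineW l (s+1) k

theorem lineW_lt (l : List String) (s k : Int) (h : k < s) : lineW l s k = 0 := by
  induction l generalizing s with
  | nil => rfl
  | cons c l ih =>
      simp only [lineW, if_neg (by omega : ¬ k = s)]
      exact ih (s+1) (by omega)

theorem lineW_getD (l : List String) (s : Int) (i : Nat) :
    lineW l s (s + i) = (l.map (fun c => c.toList.length)).getD i 0 := by
  induction l generalizing s i with
  | nil => simp [lineW]
  | cons c l ih =>
      cases i with
      | zero =>
          rw [show (s + ((0:Nat):Int)) = s by simp]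
          simp only [lineW]
          rw [lineW_lt l (s+1) s (by omega)]
          simp
      | succ j =>
          simp only [lineW, if_neg (by omega : ¬ (s + (j+1 : Nat) : Int) = s)]
          have : (s + (j+1 : Nat) : Int) = (s + 1) + j := by push_cast; ring
          rw [this, ih]
          simp

-- one line of A's first loop, pointwise on the dict
theorem stepLine_getD (line : List String) (s k : Int) (d : PySem.Dict Int Nat) :
    (((PySem.List.enumerate line s).foldl
        (fun d p => d.insert p.1 (max (d.getD p.1 0) p.2.toList.length)) d).getD k 0)
      = max (d.getD k 0) (lineW line s k) := by
  induction line generalizing s d with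
  | nil => simp [PySem.List.enumerate_nil, lineW]
  | cons c l ih =>
      rw [PySem.List.enumerate_cons]
      simp only [List.foldl_cons, lineW]
      rw [ih]
      by_cases hk : k = s
      · subst hk
        rw [lineW_lt l (k+1) k (by omega)]
        simp
      · simp [PySem.Dict.getD_insert, hk]

-- column width as an Int-keyed max over the whole table
def tabW : List (List String) → Int → Nat
  | [], _ => 0
  | line :: t, k => max (lineW line 0 k) (tabW t k)

theorem widthsA_getD (table : List (List String)) (d : PySem.Dict Int Nat) (k : Int) :
    ((table.foldl
        (fun d line =>
          (PySem.List.enumerate line).foldl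
            (fun d p => d.insert p.1 (max (d.getD p.1 0) p.2.toList.length)) d) d).getD k 0)
      = max (d.getD k 0) (tabW table k) := by
  induction table generalizing d with
  | nil => simp [tabW]
  | cons line t ih =>
      simp only [List.foldl_cons, tabW]
      rw [ih, stepLine_getD]
      omega

theorem tabW_eq_colW (rows : List (List String)) (j : Nat) :
    tabW rows (j : Int) = colW rows j := by
  induction rows with
  | nil => rfl
  | cons line t ih =>
      simp only [tabW, colW, List.foldr_cons]
      rw [ih]
      have := lineW_getD line 0 j
      simp only [zero_add] at this
      rw [this]
      rfl

theorem tabulate_eq_canon (table : List (List String)) : tabulate table = canon table := by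
  unfold tabulate canon
  rw [PySem.List.foldl_append_singleton_eq_map]
  simp only [List.nil_append]
  refine List.map_congr_left ?_
  intro line _
  apply List.ext_getElem?
  intro i
  rw [List.getElem?_map, List.getElem?_mapIdx, PySem.List.getElem?_enumerate]
  generalize getElem? line i = o
  cases o with
  | none => simp
  | some c =>
      simp only [Option.map_some]
      have : ((table.foldl
          (fun d line =>
            (PySem.List.enumerate line).foldl
              (fun d p => d.insert p.1 (max (d.getD p.1 0) p.2.toList.length)) d)
          PySem.Dict.empty).getD ((0:Int) + i) 0) = colW table i := by
        rw [widthsA_getD]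
        simp [tabW_eq_colW]
      rw [this]

-- ---- B-side lemmas ----

theorem foldl_max_eq (l : List Nat) (a : Nat) :
    l.foldl max a = max a (l.foldr max 0) := by
  induction l generalizing a with
  | nil => simp
  | cons x t ih => simp only [List.foldl_cons, List.foldr_cons, ih]; omega

-- the padded-column max equals colW (also when the column is empty: both 0)
theorem colMax_eq (rows : List (List String)) (j : Nat) :
    ((((rows.filter (fun r => decide (j < r.length))).map (fun r => r.getD j "")).map
        (fun c => c.toList.length)).foldr max 0) = colW rows j := by
  induction rows with
  | nil => rfl
  | cons r t ih =>
      by_cases hr : j < r.length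
      · rw [List.filter_cons_of_pos (by simpa using hr)]
        simp only [List.map_cons, List.foldr_cons, colW, ih]
        have : ((r.map (fun s => s.toList.length)).getD j 0) = (r.getD j "").toList.length := by
          rw [List.getD_eq_getElem?_getD, List.getD_eq_getElem?_getD,
            List.getElem?_map, List.getElem?_eq_getElem hr]
          simp
        rw [this]
      · rw [List.filter_cons_of_neg (by simpa using hr)]
        simp only [colW, List.foldr_cons, ih]
        have : ((r.map (fun s => s.toList.length)).getD j 0) = 0 := by
          rw [List.getD_eq_getElem?_getD, List.getElem?_map,
            List.getElem?_eq_none (by omega)]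
          rfl
        rw [this]
        simp

theorem maxD_col_eq (rows : List (List String)) (j : Nat)
    (h : (rows.filter (fun r => decide (j < r.length))).map (fun r => r.getD j "") ≠ []) :
    ((PySem.List.max?
        (((rows.filter (fun r => decide (j < r.length))).map (fun r => r.getD j "")).map
          (fun c => c.toList.length)) (fun y => y)).getD 0) = colW rows j := by
  rw [← colMax_eq rows j]
  cases hc : ((rows.filter (fun r => decide (j < r.length))).map (fun r => r.getD j "")).map
      (fun c => c.toList.length) with
  | nil =>
      exact absurd (List.map_eq_nil_iff.mp hc) h
  | cons x t =>
      rw [PySem.List.max?_id_cons]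
      simp only [Option.getD_some, List.foldr_cons]
      rw [foldl_max_eq]

-- zipping a list with a map over its own zip
theorem zip_map_zip {α β γ : Type} (l1 : List α) (l2 : List β) (g : α × β → γ)
    (h : l2.length = l1.length) :
    l1.zip ((l1.zip l2).map g) = (l1.zip l2).map (fun p => (p.1, g p)) := by
  induction l1 generalizing l2 with
  | nil => simp
  | cons a t ih =>
      cases l2 with
      | nil => simp at h
      | cons b s =>
          simp only [List.zip_cons_cons, List.map_cons]
          rw [ih s (by simpa using h)]

theorem map_snd_zip_eq {α β : Type} (l1 : List α) (l2 : List β) (h : l2.length = l1.length) :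
    (l1.zip l2).map (fun p => p.2) = l2 := by
  induction l1 generalizing l2 with
  | nil => cases l2 with | nil => simp | cons b s => simp at h
  | cons a t ih =>
      cases l2 with
      | nil => simp at h
      | cons b s => simp only [List.zip_cons_cons, List.map_cons]; rw [ih s (by simpa using h)]

-- loop invariant: colsLoop finishes each output row with its formatted columns ≥ j
theorem colsLoop_eq (rows : List (List String)) (k : Nat) :
    ∀ (j : Nat) (out : List (List String)), out.length = rows.length → maxLen rows ≤ j + k →
    colsLoop rows out j
      = (rows.zip out).map
          (fun p => p.2 ++ (p.1.drop j).mapIdx (fun i c => pyLjust c (colW rows (j + i)))) := by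
  induction k with
  | zero =>
      intro j out hlen hle
      rw [colsLoop]
      have hcol : (rows.filter (fun r => decide (j < r.length))).map (fun r => r.getD j "") = [] := by
        by_contra h
        have := lt_maxLen_of_filter_ne rows j (fun he => h (by rw [he]; rfl))
        omega
      rw [dif_pos hcol]
      have : ∀ p ∈ rows.zip out,
          p.2 ++ (p.1.drop j).mapIdx (fun i c => pyLjust c (colW rows (j + i))) = p.2 := by
        intro p hp
        have h1 : p.1 ∈ rows := (List.of_mem_zip hp).1
        have := length_le_maxLen rows p.1 h1
        rw [List.drop_eq_nil_of_le (by omega)]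
        simp
      rw [List.map_congr_left this]
      exact (map_snd_zip_eq rows out hlen).symm
  | succ k ih =>
      intro j out hlen hle
      rw [colsLoop]
      by_cases hcol : (rows.filter (fun r => decide (j < r.length))).map (fun r => r.getD j "") = []
      · -- column empty: every row has length ≤ j; same argument as the base case
        rw [dif_pos hcol]
        have : ∀ p ∈ rows.zip out,
            p.2 ++ (p.1.drop j).mapIdx (fun i c => pyLjust c (colW rows (j + i))) = p.2 := by
          intro p hp
          have h1 : p.1 ∈ rows := (List.of_mem_zip hp).1
          have hsh : ¬ j < p.1.length := by
            intro hlt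
            have hmem : p.1 ∈ rows.filter (fun r => decide (j < r.length)) :=
              List.mem_filter.mpr ⟨h1, by simpa using hlt⟩
            rw [List.eq_nil_iff_forall_not_mem] at hcol
            exact hcol (p.1.getD j "") (List.mem_map.mpr ⟨p.1, hmem, rfl⟩)
          rw [List.drop_eq_nil_of_le (by omega)]
          simp
        rw [List.map_congr_left this]
        exact (map_snd_zip_eq rows out hlen).symm
      · rw [dif_neg hcol]
        have hw := maxD_col_eq rows j hcol
        set w := ((PySem.List.max?
            (((rows.filter (fun r => decide (j < r.length))).map (fun r => r.getD j "")).map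
              (fun c => c.toList.length)) (fun y => y)).getD 0) with hwdef
        set g := (fun p : List String × List String =>
            if j < p.1.length then p.2 ++ [pyLjust (p.1.getD j "") w] else p.2) with hg
        have hlen' : ((rows.zip out).map g).length = rows.length := by
          simp [List.length_zip, hlen]
        rw [ih (j+1) ((rows.zip out).map g) hlen' (by omega)]
        rw [zip_map_zip rows out g hlen]
        rw [List.map_map]
        refine List.map_congr_left ?_
        intro p hp
        simp only [Function.comp]
        by_cases hj : j < p.1.length
        · simp only [hg, if_pos hj]
          rw [List.drop_eq_getElem_cons hj, List.mapIdx_cons, List.append_assoc,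
            List.singleton_append]
          have hget : p.1.getD j "" = p.1[j] := by
            rw [List.getD_eq_getElem?_getD, List.getElem?_eq_getElem hj]; rfl
          have h0 : colW rows (j + 0) = colW rows j := by norm_num
          have hfun : (fun (i : Nat) (c : String) => pyLjust c (colW rows (j + 1 + i)))
              = (fun (i : Nat) (c : String) => pyLjust c (colW rows (j + (i + 1)))) := by
            funext i c
            rw [show j + 1 + i = j + (i + 1) by omega]
          rw [hw, hget, h0, hfun]
        · simp only [hg, if_neg hj]
          rw [List.drop_eq_nil_of_le (by omega), List.drop_eq_nil_of_le (by omega)]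
          simp

theorem zip_map_const {α β : Type} (l : List α) (b : β) :
    l.zip (l.map (fun _ => b)) = l.map (fun r => (r, b)) := by
  induction l with
  | nil => rfl
  | cons a t ih => simp only [List.map_cons, List.zip_cons_cons]; rw [ih]

theorem tabulate_alt_eq_canon (table : List (List String)) :
    tabulate_alt table = canon table := by
  unfold tabulate_alt canon
  have h1 : (table.map (fun line => line.map (fun c => c))) = table := by simp
  rw [h1]
  rw [colsLoop_eq table (maxLen table) 0 (table.map (fun _ => [])) (by simp) (by omega)]
  rw [zip_map_const table ([] : List String), List.map_map]
  refine List.map_congr_left ?_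
  intro r _
  simp

-- ===== VERDICT (by name: the statement is the Claim_ definition above) =====
theorem tabulate_spec : Claim_equal_tabulate := by
  intro table _
  unfold Spec_tabulate
  rw [tabulate_eq_canon, tabulate_alt_eq_canon]
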